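-- pv_equiv track=rewrite | github.com/pk-zhu/Coolsecture | src/coolsecture/liftcontacts.py | _build_chr_bins
-- ===== SOURCE A (Python) =====
-- def _build_chr_bins(bins_dict, idx):
--     chr_bins = {}
--     for bid, (chrom, start, end) in bins_dict.items():
--         N = idx[chrom]
--         chr_bins.setdefault(N, []).append((start, bid))
--     for N in chr_bins:
--         chr_bins[N].sort(key=lambda x: x[0])
--         chr_bins[N] = [bid for _, bid in chr_bins[N]]
--     return chr_bins
-- ===== SOURCE B (Python) =====
-- def _build_chr_bins(bins_dict, idx):
--     # Pre-create groups in first-appearance order of the chromosome index,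
--     # then one stable global sort by start and a single grouping pass.
--     chr_bins = {idx[chrom]: [] for chrom, _, _ in bins_dict.values()}
--     for bid, (chrom, start, _end) in sorted(bins_dict.items(), key=lambda kv: kv[1][1]):
--         chr_bins[idx[chrom]].append(bid)
--     return chr_bins
-- ===== Notes on version B (the rewrite author's own statement) =====
-- stated objective: alternative
-- what changed: A groups (start,bid) pairs per chromosome and then stable-sorts each group separately; B pre-creates the groups in first-appearance order, stable-sorts the whole item list once by start, and fills the groups in a single grouping pass with no per-group sorting.
import Mathlib
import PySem

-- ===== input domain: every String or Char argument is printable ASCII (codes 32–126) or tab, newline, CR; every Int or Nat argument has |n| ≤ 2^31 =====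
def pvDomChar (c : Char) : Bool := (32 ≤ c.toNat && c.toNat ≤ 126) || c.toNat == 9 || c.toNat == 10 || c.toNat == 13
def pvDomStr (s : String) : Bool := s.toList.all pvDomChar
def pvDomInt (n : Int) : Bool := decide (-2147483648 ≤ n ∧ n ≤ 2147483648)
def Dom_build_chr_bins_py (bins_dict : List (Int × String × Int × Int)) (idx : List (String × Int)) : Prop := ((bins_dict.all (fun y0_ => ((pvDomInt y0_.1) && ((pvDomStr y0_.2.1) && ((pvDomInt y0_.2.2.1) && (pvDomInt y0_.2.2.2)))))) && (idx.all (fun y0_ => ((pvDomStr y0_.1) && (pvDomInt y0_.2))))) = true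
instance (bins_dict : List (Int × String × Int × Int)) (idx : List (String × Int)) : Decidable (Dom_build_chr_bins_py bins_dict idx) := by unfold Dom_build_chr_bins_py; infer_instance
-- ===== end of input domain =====

-- B replaces A's per-chromosome stable sorts by one global stable sort by start followed by a
-- single grouping pass into pre-created groups (alternative decomposition, same cost).


-- ===== PORT A =====
-- shared helper: Python's idx[chrom]; a missing key raises KeyError, which Pre_ excludes,
-- so the default 0 is never reached on admitted inputs
def idxAt (idx : List (String × Int)) (chrom : String) : Int :=
  (PySem.Dict.mk idx).getD chrom 0

def build_chr_bins_py (bins_dict : List (Int × String × Int × Int)) (idx : List (String × Int)) : List (Int × List Int) :=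
  -- first loop: chr_bins.setdefault(N, []).append((start, bid))
  let d : PySem.Dict Int (List (Int × Int)) :=
    bins_dict.foldl (fun d e => d.modify (idxAt idx e.2.1) [] (fun l => l ++ [(e.2.2.1, e.1)])) PySem.Dict.empty
  -- second loop: per key, stable sort by start then keep the bids
  d.items.map (fun kv => (kv.1, (PySem.List.sorted kv.2 (fun x => x.1)).map (fun x => x.2)))

-- ===== PORT B =====
def build_chr_bins_py_alt (bins_dict : List (Int × String × Int × Int)) (idx : List (String × Int)) : List (Int × List Int) :=
  -- {idx[chrom]: [] for chrom, _, _ in bins_dict.values()}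
  let chr_bins : PySem.Dict Int (List Int) :=
    PySem.Dict.mk ((PySem.List.dedup (bins_dict.map (fun e => idxAt idx e.2.1))).map (fun k => (k, [])))
  -- chr_bins[idx[chrom]].append(bid): the key is always present (same expression as the
  -- comprehension above), so modify with default [] is exact here
  let d := (PySem.List.sorted bins_dict (fun e => e.2.2.1)).foldl
    (fun d e => d.modify (idxAt idx e.2.1) [] (fun l => l ++ [e.1])) chr_bins
  d.items

-- ===== PRECONDITION & SPEC =====
-- Pre_ excludes exactly the inputs on which Python A raises KeyError: a bin whose chromosome
-- is not a key of idx.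
def Pre_build_chr_bins_py (bins_dict : List (Int × String × Int × Int)) (idx : List (String × Int)) : Prop :=
  (bins_dict.all (fun e => (PySem.Dict.mk idx).contains e.2.1)) = true
instance (bins_dict : List (Int × String × Int × Int)) (idx : List (String × Int)) : Decidable (Pre_build_chr_bins_py bins_dict idx) := by unfold Pre_build_chr_bins_py; infer_instance

def pvWitness_build_chr_bins_py : (List (Int × String × Int × Int)) × (List (String × Int)) :=
  ([(0, "c", 1, 2), (1, "c", 0, 1)], [("c", 0)])

def Spec_build_chr_bins_py (bins_dict : List (Int × String × Int × Int)) (idx : List (String × Int)) (out : List (Int × List Int)) : Prop := out = build_chr_bins_py_alt bins_dict idx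
instance (bins_dict : List (Int × String × Int × Int)) (idx : List (String × Int)) (out : List (Int × List Int)) : Decidable (Spec_build_chr_bins_py bins_dict idx out) := by unfold Spec_build_chr_bins_py; infer_instance

-- ===== CLAIM (what is proved, stated in full; the proofs are below) =====
def Claim_equal_build_chr_bins_py : Prop := ∀ (bins_dict : List (Int × String × Int × Int)) (idx : List (String × Int)), Dom_build_chr_bins_py bins_dict idx → Pre_build_chr_bins_py bins_dict idx → Spec_build_chr_bins_py bins_dict idx (build_chr_bins_py bins_dict idx)

-- ===== LEMMAS AND PROOFS =====

-- getD on a literal dict whose values are all [] is []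
theorem getD_mk_const_nil {α : Type} (ks : List Int) (c : Int) :
    (PySem.Dict.mk (ks.map (fun k => (k, ([] : List α))))).getD c [] = [] := by
  induction ks with
  | nil => simp [PySem.Dict.getD_eq_get?_getD, PySem.Dict.get?]
  | cons k ks ih =>
    simp only [List.map_cons, PySem.Dict.getD_eq_get?_getD, PySem.Dict.get?_mk_cons]
    split
    · rfl
    · simpa [PySem.Dict.getD_eq_get?_getD] using ih

theorem insertBy_all_before {α : Type} (before : α → α → Bool) (x : α) (ys : List α)
    (h : ∀ y ∈ ys, before x y = true) :
    PySem.List.insertBy before x ys = x :: ys := by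
  cases ys with
  | nil => rfl
  | cons y ys => simp [PySem.List.insertBy, h y (by simp)]

theorem pairwise_insertBy {α : Type} (k : α → Int) (x : α) (ys : List α)
    (h : ys.Pairwise (fun a b => k a ≤ k b)) :
    (PySem.List.insertBy (fun a b => decide (k a < k b)) x ys).Pairwise (fun a b => k a ≤ k b) := by
  induction ys with
  | nil => simp [PySem.List.insertBy]
  | cons y ys ih =>
    rw [List.pairwise_cons] at h
    simp only [PySem.List.insertBy]
    split
    · rename_i hlt
      simp only [decide_eq_true_eq] at hlt
      refine List.pairwise_cons.2 ⟨?_, List.pairwise_cons.2 ⟨h.1, h.2⟩⟩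
      intro z hz
      rcases List.mem_cons.1 hz with hz | hz
      · subst hz; omega
      · have := h.1 z hz; omega
    · refine List.pairwise_cons.2 ⟨?_, ih h.2⟩
      rename_i hlt
      simp only [decide_eq_true_eq] at hlt
      intro z hz
      rcases (PySem.List.mem_insertBy _ _ _ _).1 hz with hz | hz
      · subst hz; omega
      · exact h.1 z hz

theorem filter_insertBy {α : Type} (k : α → Int) (p : α → Bool) (x : α) (ys : List α)
    (h : ys.Pairwise (fun a b => k a ≤ k b)) :
    (PySem.List.insertBy (fun a b => decide (k a < k b)) x ys).filter p
      = if p x then PySem.List.insertBy (fun a b => decide (k a < k b)) x (ys.filter p)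
        else ys.filter p := by
  induction ys with
  | nil => by_cases hp : p x <;> simp [PySem.List.insertBy, hp]
  | cons y ys ih =>
    rw [List.pairwise_cons] at h
    simp only [PySem.List.insertBy]
    split
    · rename_i hlt
      simp only [decide_eq_true_eq] at hlt
      by_cases hp : p x
      · -- x kept: x goes in front of the filtered tail as well
        have hall : ∀ z ∈ (y :: ys).filter p, (fun a b => decide (k a < k b)) x z = true := by
          intro z hz
          have hzmem := List.mem_of_mem_filter hz
          rcases List.mem_cons.1 hzmem with hz' | hz'
          · subst hz'; simpa using hlt
          · have := h.1 z hz'; simp; omega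
        rw [insertBy_all_before _ _ _ hall]
        simp [hp, List.filter]
      · simp [List.filter, hp]
    · rename_i hlt
      rw [List.filter_cons]
      by_cases hpy : p y
      · rw [if_pos hpy, ih h.2]
        by_cases hp : p x
        · rw [if_pos hp, if_pos hp, List.filter_cons, if_pos hpy]
          simp only [PySem.List.insertBy]
          rw [if_neg hlt]
        · rw [if_neg hp, if_neg hp, List.filter_cons, if_pos hpy]
      · rw [if_neg hpy, ih h.2, List.filter_cons, if_neg hpy]

theorem foldl_insertBy_filter {α : Type} (k : α → Int) (p : α → Bool) :
    ∀ (l acc : List α), acc.Pairwise (fun a b => k a ≤ k b) →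
    (l.foldl (fun acc x => PySem.List.insertBy (fun a b => decide (k a < k b)) x acc) acc).filter p
      = (l.filter p).foldl (fun acc x => PySem.List.insertBy (fun a b => decide (k a < k b)) x acc)
          (acc.filter p) := by
  intro l
  induction l with
  | nil => intro acc _; rfl
  | cons x l ih =>
    intro acc hacc
    simp only [List.foldl_cons, List.filter_cons]
    rw [ih _ (pairwise_insertBy k x acc hacc), filter_insertBy k p x acc hacc]
    split <;> simp

-- stable sort commutes with filter
theorem sorted_filter {α : Type} (k : α → Int) (p : α → Bool) (l : List α) :
    (PySem.List.sorted l k).filter p = PySem.List.sorted (l.filter p) k := by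
  rw [PySem.List.sorted_eq_foldl_insertBy, PySem.List.sorted_eq_foldl_insertBy]
  simpa using foldl_insertBy_filter k p l [] (by simp)

theorem insertBy_map {α β : Type} (g : α → β) (k : β → Int) (x : α) (ys : List α) :
    PySem.List.insertBy (fun a b => decide (k a < k b)) (g x) (ys.map g)
      = (PySem.List.insertBy (fun a b => decide (k (g a) < k (g b))) x ys).map g := by
  induction ys with
  | nil => rfl
  | cons y ys ih =>
    simp only [List.map_cons, PySem.List.insertBy]
    split <;> simp_all

-- stable sort commutes with map when the key factors through the map
theorem sorted_map {α β : Type} (g : α → β) (k : β → Int) (l : List α) :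
    PySem.List.sorted (l.map g) k = (PySem.List.sorted l (fun e => k (g e))).map g := by
  rw [PySem.List.sorted_eq_foldl_insertBy, PySem.List.sorted_eq_foldl_insertBy]
  suffices h : ∀ (l acc : List α),
      (l.map g).foldl (fun acc x => PySem.List.insertBy (fun a b => decide (k a < k b)) x acc) (acc.map g)
        = (l.foldl (fun acc x => PySem.List.insertBy (fun a b => decide (k (g a) < k (g b))) x acc) acc).map g by
    simpa using h l []
  intro l
  induction l with
  | nil => intro acc; rfl
  | cons x l ih =>
    intro acc
    simp only [List.map_cons, List.foldl_cons]
    rw [insertBy_map g k x acc, ih]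

theorem Set_update_of_subset {α : Type} [BEq α] [LawfulBEq α] (s : PySem.Set α) (xs : List α)
    (h : ∀ x ∈ xs, x ∈ s) : PySem.Set.update s xs = s := by
  rw [PySem.Set.update_eq_append_filter]
  have hnil : List.filter (fun y => !s.contains y) (PySem.Set.ofList xs) = [] := by
    rw [List.filter_eq_nil_iff]
    intro y hy
    have hmem := h y ((PySem.Set.mem_ofList xs y).1 hy)
    simp
    exact hmem
  rw [hnil, List.append_nil]

-- the two ports agree, for any key function kf (instantiated with fun e => idxAt idx e.2.1)
theorem ports_eq (bins_dict : List (Int × String × Int × Int)) (kf : (Int × String × Int × Int) → Int) :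
    ((bins_dict.foldl (fun d e => d.modify (kf e) [] (fun l => l ++ [(e.2.2.1, e.1)])) PySem.Dict.empty).items.map
        (fun kv => (kv.1, (PySem.List.sorted kv.2 (fun x => x.1)).map (fun x => x.2))))
      = ((PySem.List.sorted bins_dict (fun e => e.2.2.1)).foldl
          (fun d e => d.modify (kf e) [] (fun l => l ++ [e.1]))
          (PySem.Dict.mk ((PySem.List.dedup (bins_dict.map kf)).map (fun k => (k, []))))).items := by
  set Ks : List Int := bins_dict.map kf with hKs
  -- ===== A side =====
  have hAkeys :
      (bins_dict.foldl (fun d e => d.modify (kf e) [] (fun l => l ++ [(e.2.2.1, e.1)])) PySem.Dict.empty).keys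
        = PySem.Set.ofList Ks := by
    rw [PySem.Dict.keys_foldl_modify_key bins_dict kf [] (fun _ e => fun l => l ++ [(e.2.2.1, e.1)])]
    rw [PySem.Dict.keys_empty, PySem.Set.update_nil_left]
  have hAgetD : ∀ c : Int,
      (bins_dict.foldl (fun d e => d.modify (kf e) [] (fun l => l ++ [(e.2.2.1, e.1)])) PySem.Dict.empty).getD c []
        = ((bins_dict.filter (fun e => kf e == c)).map (fun e => (e.2.2.1, e.1))) := by
    intro c
    have h1 := PySem.Dict.getD_foldl_modify_append
      (bins_dict.map (fun e => (kf e, (e.2.2.1, e.1)))) PySem.Dict.empty c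
    simp only [List.foldl_map] at h1
    rw [h1]
    simp [List.filter_map, Function.comp_def]
  -- ===== B side =====
  have hB0keys : (PySem.Dict.mk ((PySem.List.dedup Ks).map (fun k => (k, ([] : List Int))))).keys
      = PySem.Set.ofList Ks := by
    rw [PySem.Dict.keys_mk, List.map_map]
    simp [PySem.List.dedup_eq_ofList, Function.comp_def]
  have hBkeys :
      ((PySem.List.sorted bins_dict (fun e => e.2.2.1)).foldl
          (fun d e => d.modify (kf e) [] (fun l => l ++ [e.1]))
          (PySem.Dict.mk ((PySem.List.dedup Ks).map (fun k => (k, ([] : List Int)))))).keys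
        = PySem.Set.ofList Ks := by
    rw [PySem.Dict.keys_foldl_modify_key _ kf [] (fun _ e => fun l => l ++ [e.1])]
    rw [hB0keys]
    apply Set_update_of_subset
    intro x hx
    rcases List.mem_map.1 hx with ⟨e, he, rfl⟩
    rw [PySem.Set.mem_ofList]
    exact List.mem_map.2 ⟨e, (PySem.List.mem_sorted _ _ _ _).1 he, rfl⟩
  have hBgetD : ∀ c : Int,
      ((PySem.List.sorted bins_dict (fun e => e.2.2.1)).foldl
          (fun d e => d.modify (kf e) [] (fun l => l ++ [e.1]))
          (PySem.Dict.mk ((PySem.List.dedup Ks).map (fun k => (k, ([] : List Int)))))).getD c []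
        = ((PySem.List.sorted bins_dict (fun e => e.2.2.1)).filter (fun e => kf e == c)).map (fun e => e.1) := by
    intro c
    have h1 := PySem.Dict.getD_foldl_modify_append
      ((PySem.List.sorted bins_dict (fun e => e.2.2.1)).map (fun e => (kf e, e.1)))
      (PySem.Dict.mk ((PySem.List.dedup Ks).map (fun k => (k, ([] : List Int))))) c
    simp only [List.foldl_map] at h1
    rw [h1]
    rw [PySem.List.dedup_eq_ofList, getD_mk_const_nil]
    simp [List.filter_map, Function.comp_def]
  -- ===== items of both dicts via their (identical, nodup) key lists =====
  have hnodup : (PySem.Set.ofList Ks).Nodup := PySem.Set.nodup_ofList Ks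
  rw [PySem.Dict.items_eq_map_keys _ (by rw [hAkeys]; exact hnodup) []]
  rw [PySem.Dict.items_eq_map_keys _ (by rw [hBkeys]; exact hnodup) []]
  rw [hAkeys, hBkeys, List.map_map]
  apply List.map_congr_left
  intro c _
  simp only [Function.comp_apply, hAgetD c, hBgetD c]
  refine Prod.ext rfl ?_
  -- per-key value: A sorts the group, B filters the globally sorted list
  show (PySem.List.sorted ((bins_dict.filter (fun e => kf e == c)).map (fun e => (e.2.2.1, e.1)))
          (fun x => x.1)).map (fun x => x.2)
      = ((PySem.List.sorted bins_dict (fun e => e.2.2.1)).filter (fun e => kf e == c)).map (fun e => e.1)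
  rw [sorted_map (fun e => (e.2.2.1, e.1)) (fun x => x.1) (bins_dict.filter (fun e => kf e == c))]
  rw [List.map_map]
  rw [sorted_filter (fun e => e.2.2.1) (fun e => kf e == c) bins_dict]
  rfl

-- ===== VERDICT (by name: the statement is the Claim_ definition above) =====
theorem build_chr_bins_py_spec : Claim_equal_build_chr_bins_py := by
  intro bins_dict idx _hdom _hpre
  unfold Spec_build_chr_bins_py build_chr_bins_py build_chr_bins_py_alt
  exact ports_eq bins_dict (fun e => idxAt idx e.2.1)
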